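-- pv_equiv track=rewrite | github.com/pypi-data/pypi-mirror-328 | packages/cnrgh-dl/cnrgh_dl-1.0.0.tar.gz/cnrgh_dl-1.0.0/src/cnrgh_dl/utils.py | remove_keys_from
-- ===== SOURCE A (Python) =====
-- from typing import Any, TypeVar
--
-- def remove_keys_from(
--     target: dict[str, Any],
--     origin: dict[str, Any],
-- ) -> dict[str, Any]:
--     keys_to_remove = set()
--     for key in target:
--         if key in origin:
--             keys_to_remove.add(key)
--
--     for key in keys_to_remove:
--         del target[key]
--
--     return target
-- ===== SOURCE B (Python) =====
-- def remove_keys_from(target, origin):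
--     # One forward pass collecting the surviving entries, then rebuild the
--     # same dict object in place (clear + per-entry reinsertion).
--     kept = []
--     for k, v in target.items():
--         if k not in origin:
--             kept.append((k, v))
--     target.clear()
--     for k, v in kept:
--         target[k] = v
--     return target
-- ===== Notes on version B (the rewrite author's own statement) =====
-- stated objective: simpler
-- what changed: Instead of A's two-phase collect-the-victims-into-a-set-then-delete-each, B makes one forward pass collecting the complementary surviving entries into a list and rebuilds the same dict object in place (clear, then reinsert each survivor), preserving identity and key order.
import Mathlib
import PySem

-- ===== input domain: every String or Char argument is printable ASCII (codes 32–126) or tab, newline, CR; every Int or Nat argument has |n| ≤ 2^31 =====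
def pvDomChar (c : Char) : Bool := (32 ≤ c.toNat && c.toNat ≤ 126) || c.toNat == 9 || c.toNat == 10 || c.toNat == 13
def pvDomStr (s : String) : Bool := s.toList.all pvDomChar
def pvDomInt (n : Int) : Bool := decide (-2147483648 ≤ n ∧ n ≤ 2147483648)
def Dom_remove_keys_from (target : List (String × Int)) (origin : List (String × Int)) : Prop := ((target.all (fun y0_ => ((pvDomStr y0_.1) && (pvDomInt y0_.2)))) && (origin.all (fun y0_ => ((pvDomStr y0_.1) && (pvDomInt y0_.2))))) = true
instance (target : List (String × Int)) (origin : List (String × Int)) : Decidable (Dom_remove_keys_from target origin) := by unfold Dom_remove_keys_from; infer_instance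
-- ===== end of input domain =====

-- B replaces A's collect-victims-then-delete two-phase loop by one forward pass
-- collecting the complementary SURVIVING entries into a list, then rebuilding the
-- dict entry by entry (simpler). Python A mutates `target` in place; B performs the
-- same in-place mutation (clear + reinsertion); the theorem here is about the RETURN value.

-- ===== PORT A =====
-- keys_to_remove = set(); for key in target: if key in origin: add; then del each.
-- (Deleting a set of keys is order-independent, so folding the Set in its list order is exact.)
def remove_keys_from (target : List (String × Int)) (origin : List (String × Int)) : List (String × Int) :=
  let t := PySem.Dict.ofList target
  let o := PySem.Dict.ofList origin
  let keysToRemove : PySem.Set String :=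
    t.keys.foldl (fun s key => if o.contains key then PySem.Set.add s key else s) PySem.Set.empty
  (keysToRemove.foldl (fun d key => d.erase key) t).items

-- ===== PORT B =====
-- first loop: kept = []; for k, v in target.items(): if k not in origin: kept.append((k, v))
def pvKeptLoop (o : PySem.Dict String Int) (acc : List (String × Int)) :
    List (String × Int) → List (String × Int)
  | [] => acc
  | kv :: rest => pvKeptLoop o (if o.contains kv.1 then acc else acc ++ [kv]) rest

-- second loop: target.clear(); for k, v in kept: target[k] = v
def pvUpdateLoop (d : PySem.Dict String Int) :
    List (String × Int) → PySem.Dict String Int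
  | [] => d
  | kv :: rest => pvUpdateLoop (d.insert kv.1 kv.2) rest

def remove_keys_from_alt (target : List (String × Int)) (origin : List (String × Int)) : List (String × Int) :=
  (pvUpdateLoop PySem.Dict.empty
    (pvKeptLoop (PySem.Dict.ofList origin) [] (PySem.Dict.ofList target).items)).items

-- ===== PRECONDITION & SPEC =====
def Spec_remove_keys_from (target : List (String × Int)) (origin : List (String × Int)) (out : List (String × Int)) : Prop := out = remove_keys_from_alt target origin
instance (target : List (String × Int)) (origin : List (String × Int)) (out : List (String × Int)) : Decidable (Spec_remove_keys_from target origin out) := by unfold Spec_remove_keys_from; infer_instance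

-- ===== CLAIM (what is proved, stated in full; the proofs are below) =====
def Claim_equal_remove_keys_from : Prop := ∀ (target : List (String × Int)) (origin : List (String × Int)), Dom_remove_keys_from target origin → Spec_remove_keys_from target origin (remove_keys_from target origin)

-- ===== LEMMAS AND PROOFS =====

-- B's first loop is a filter of the items (survivors, in order).
theorem pvKeptLoop_eq (o : PySem.Dict String Int) (acc l) :
    pvKeptLoop o acc l = acc ++ l.filter (fun kv => !o.contains kv.1) := by
  induction l generalizing acc with
  | nil => simp [pvKeptLoop]
  | cons kv rest ih =>
    rw [pvKeptLoop, ih]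
    by_cases h : o.contains kv.1 = true <;> simp [h]

-- B's second loop is the insert-fold.
theorem pvUpdateLoop_eq (l : List (String × Int)) (d : PySem.Dict String Int) :
    pvUpdateLoop d l = l.foldl (fun d kv => d.insert kv.1 kv.2) d := by
  induction l generalizing d with
  | nil => rfl
  | cons kv rest ih => rw [pvUpdateLoop, ih]; rfl

-- Folding `erase` over a list of keys filters the items by those keys.
theorem items_foldl_erase (ks : List String) (d : PySem.Dict String Int) :
    (ks.foldl (fun d k => d.erase k) d).items
      = d.items.filter (fun kv => !ks.contains kv.1) := by
  induction ks generalizing d with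
  | nil => simp
  | cons k ks ih =>
    rw [List.foldl_cons, ih]
    show List.filter _ (List.filter (fun p => !p.1 == k) d.items) = _
    rw [List.filter_filter]
    apply List.filter_congr
    intro kv _
    by_cases h : kv.1 = k <;> simp [h]

-- Membership in A's collected set of keys.
theorem mem_collect (o : PySem.Dict String Int) (l : List String) (s : PySem.Set String) (x : String) :
    x ∈ l.foldl (fun s key => if o.contains key then PySem.Set.add s key else s) s
      ↔ x ∈ s ∨ (x ∈ l ∧ o.contains x = true) := by
  induction l generalizing s with
  | nil => simp
  | cons k l ih =>
    simp only [List.foldl_cons]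
    by_cases h : o.contains k = true
    · simp only [h, if_pos]
      rw [ih]
      simp only [PySem.Set.mem_add, List.mem_cons]
      constructor
      · rintro (⟨hs | rfl⟩ | ⟨hl, ho⟩)
        · exact Or.inl hs
        · exact Or.inr ⟨Or.inl rfl, h⟩
        · exact Or.inr ⟨Or.inr hl, ho⟩
      · rintro (hs | ⟨(rfl | hl), ho⟩)
        · exact Or.inl (Or.inl hs)
        · exact Or.inl (Or.inr rfl)
        · exact Or.inr ⟨hl, ho⟩
    · rw [if_neg h, ih]
      simp only [List.mem_cons]
      constructor
      · rintro (hs | ⟨hl, ho⟩)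
        · exact Or.inl hs
        · exact Or.inr ⟨Or.inr hl, ho⟩
      · rintro (hs | ⟨(rfl | hl), ho⟩)
        · exact Or.inl hs
        · simp [h] at ho
        · exact Or.inr ⟨hl, ho⟩

-- ===== VERDICT (by name: the statement is the Claim_ definition above) =====
theorem remove_keys_from_spec : Claim_equal_remove_keys_from := by
  intro target origin _
  unfold Spec_remove_keys_from remove_keys_from remove_keys_from_alt
  simp only
  set t := PySem.Dict.ofList target with ht
  set o := PySem.Dict.ofList origin with ho
  -- A's side: erase-fold is a filter over the collected key set
  rw [items_foldl_erase]
  -- B's side: both loops rewritten, then reinserting distinct fresh keys appends them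
  rw [pvKeptLoop_eq, List.nil_append, pvUpdateLoop_eq]
  have hsub : (t.items.filter (fun kv => !o.contains kv.1)).Sublist t.items :=
    List.filter_sublist
  have hnodup : ((t.items.filter (fun kv => !o.contains kv.1)).map Prod.fst).Nodup :=
    (PySem.Dict.nodup_keys_ofList target).sublist (hsub.map Prod.fst)
  have hfresh : ∀ kv ∈ t.items.filter (fun kv => !o.contains kv.1),
      (PySem.Dict.empty : PySem.Dict String Int).contains kv.1 = false := by
    intro kv _; rfl
  have hB : ((t.items.filter (fun kv => !o.contains kv.1)).foldl
        (fun d kv => d.insert kv.1 kv.2) PySem.Dict.empty).items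
      = (PySem.Dict.empty : PySem.Dict String Int).items
        ++ (t.items.filter (fun kv => !o.contains kv.1)).map (fun a => (a.1, a.2)) :=
    PySem.Dict.items_foldl_insert_fresh _ Prod.fst Prod.snd PySem.Dict.empty hfresh hnodup
  rw [hB]
  simp only [PySem.Dict.empty, List.nil_append, List.map_id']
  -- the two filters agree on every item of t
  apply List.filter_congr
  intro kv hkv
  have hk : kv.1 ∈ t.keys := by
    simp only [PySem.Dict.keys]
    exact List.mem_map_of_mem hkv
  by_cases h : o.contains kv.1 = true
  · have hmem : kv.1 ∈ t.keys.foldl (fun s key => if o.contains key then PySem.Set.add s key else s)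
        PySem.Set.empty := by
      rw [mem_collect]; exact Or.inr ⟨hk, h⟩
    have hc : List.contains (t.keys.foldl
        (fun s key => if o.contains key then PySem.Set.add s key else s) PySem.Set.empty) kv.1
        = true := List.contains_iff_mem.mpr hmem
    rw [h, hc]
  · have hmem : kv.1 ∉ t.keys.foldl (fun s key => if o.contains key then PySem.Set.add s key else s)
        PySem.Set.empty := by
      rw [mem_collect]
      rintro (hs | ⟨_, ho'⟩)
      · simp [PySem.Set.empty] at hs
      · exact h ho'
    have hc : List.contains (t.keys.foldl
        (fun s key => if o.contains key then PySem.Set.add s key else s) PySem.Set.empty) kv.1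
        = false := by simpa using hmem
    rw [hc, Bool.eq_false_iff.mpr h]
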